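-- pv_equiv track=rewrite | github.com/Onewincow/Elephe_Signal_Swag | 2019중간/3.py | nondecreasing
-- ===== SOURCE A (Python) =====
-- def nondecreasing(ns):
--     if len(ns) > 1:
--         if ns[0] > ns[1]:
--             return False
--         else:
--             return nondecreasing(ns[1:])
--     else:
--         return True
-- ===== SOURCE B (Python) =====
-- def nondecreasing(ns):
--     for i in range(len(ns) - 1):
--         if ns[i] > ns[i + 1]:
--             return False
--     return True
-- ===== Notes on version B (the rewrite author's own statement) =====
-- stated objective: simpler
-- what changed: Replaces the tail recursion with repeated list slicing ns[1:] by a single iterative index loop over adjacent pairs with an early return.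
import Mathlib
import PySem

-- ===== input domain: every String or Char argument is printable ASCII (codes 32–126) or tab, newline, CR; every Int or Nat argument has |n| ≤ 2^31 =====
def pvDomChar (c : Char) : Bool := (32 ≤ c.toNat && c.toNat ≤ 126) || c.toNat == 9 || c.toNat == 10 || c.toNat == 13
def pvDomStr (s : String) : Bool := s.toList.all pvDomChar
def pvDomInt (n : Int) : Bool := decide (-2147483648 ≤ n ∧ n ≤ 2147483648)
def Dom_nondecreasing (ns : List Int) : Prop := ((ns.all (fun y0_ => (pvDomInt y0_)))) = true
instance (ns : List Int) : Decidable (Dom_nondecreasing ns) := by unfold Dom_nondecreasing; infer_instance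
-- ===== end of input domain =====

-- B replaces A's tail recursion on the sliced tail ns[1:] by a single
-- iterative index loop over adjacent pairs with an early return (simpler; no slicing copies).

-- ===== PORT A =====
-- recursion on ns[1:]; the `| _, _` branch of the match is unreachable (len > 1 keeps both indices in range)
def nondecreasing (ns : List Int) : Bool :=
  if 1 < ns.length then
    match PySem.List.pyGet? ns 0, PySem.List.pyGet? ns 1 with
    | some a, some b =>
        if a > b then false
        else nondecreasing (PySem.List.slice ns (some 1) none)
    | _, _ => true
  else true
termination_by ns.length
decreasing_by simp [PySem.List.slice_from_one]; omega

-- ===== PORT B =====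
-- the body of 'for i in range(len(ns) - 1)' with its early return; the `| _, _` branch is unreachable
def ndAltLoop (ns : List Int) : List Int → Bool
  | [] => true
  | i :: rest =>
      match PySem.List.pyGet? ns i with
      | none => true
      | some a =>
        match PySem.List.pyGet? ns (i + 1) with
        | none => true
        | some b => if a > b then false else ndAltLoop ns rest

def nondecreasing_alt (ns : List Int) : Bool :=
  ndAltLoop ns (PySem.List.pyRange 0 ((ns.length : Int) - 1) 1)

-- ===== PRECONDITION & SPEC =====
def Spec_nondecreasing (ns : List Int) (out : Bool) : Prop := out = nondecreasing_alt ns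
instance (ns : List Int) (out : Bool) : Decidable (Spec_nondecreasing ns out) := by unfold Spec_nondecreasing; infer_instance

-- ===== CLAIM (what is proved, stated in full; the proofs are below) =====
def Claim_equal_nondecreasing : Prop := ∀ (ns : List Int), Dom_nondecreasing ns → Spec_nondecreasing ns (nondecreasing ns)

-- ===== LEMMAS AND PROOFS =====

-- reference formulation used by both directions of the proof
def chk : List Int → Bool
  | a :: b :: t => if a > b then false else chk (b :: t)
  | _ => true

lemma nondecreasing_cons_cons (a b : Int) (t : List Int) :
    nondecreasing (a :: b :: t) = if a > b then false else nondecreasing (b :: t) := by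
  rw [nondecreasing]
  have h0 : (0:Int) ≤ (t.length : Int) + 1 := by positivity
  simp [PySem.List.pyGet?, PySem.List.pyIdx?, PySem.List.slice_from_one, h0]

lemma nondecreasing_eq_chk (ns : List Int) : nondecreasing ns = chk ns := by
  induction ns with
  | nil => simp [nondecreasing, chk]
  | cons a tl ih =>
    match tl with
    | [] => simp [nondecreasing, chk]
    | b :: t =>
      rw [nondecreasing_cons_cons, chk]
      rw [ih]

lemma loop_eq_chk (t ns : List Int) : ∀ (k : Nat), ns.drop k = t →
    ndAltLoop ns (PySem.List.pyRange (k : Int) ((ns.length : Int) - 1) 1) = chk t := by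
  induction t with
  | nil =>
    intro k hk
    have hlen : ns.length ≤ k := List.drop_eq_nil_iff.mp hk
    have : PySem.List.pyRange (k : Int) ((ns.length : Int) - 1) 1 = [] := by
      rw [PySem.List.pyRange_one]
      have : ((ns.length : Int) - 1 - (k : Int)).toNat = 0 := by omega
      simp [this]
    rw [this]
    simp [ndAltLoop, chk]
  | cons a t' ih =>
    intro k hk
    have hklen : k < ns.length := by
      by_contra h
      rw [List.drop_eq_nil_iff.mpr (by omega)] at hk
      simp at hk
    have hget : ns[k]? = some a := by
      have h0 : (List.drop k ns)[0]? = ns[k + 0]? := List.getElem?_drop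
      rw [hk] at h0
      simpa using h0.symm
    have htail : ns.drop (k + 1) = t' := by
      have h1 : (List.drop k ns).tail = List.drop (k + 1) ns := List.tail_drop
      rw [hk] at h1
      simpa using h1.symm
    match t' with
    | [] =>
      have hlen : ns.length = k + 1 := by
        have := List.drop_eq_nil_iff.mp htail
        omega
      have : PySem.List.pyRange (k : Int) ((ns.length : Int) - 1) 1 = [] := by
        rw [PySem.List.pyRange_one]
        have : ((ns.length : Int) - 1 - (k : Int)).toNat = 0 := by omega
        simp [this]
      rw [this]
      simp [ndAltLoop, chk]
    | b :: t'' =>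
      have hk1 : k + 1 < ns.length := by
        by_contra h
        rw [List.drop_eq_nil_iff.mpr (by omega)] at htail
        simp at htail
      have hgetb : ns[k + 1]? = some b := by
        have h0 : (List.drop (k + 1) ns)[0]? = ns[k + 1 + 0]? := List.getElem?_drop
        rw [htail] at h0
        simpa using h0.symm
      rw [PySem.List.pyRange_one_cons (by omega)]
      rw [ndAltLoop]
      have e1 : PySem.List.pyGet? ns (k : Int) = some a := by
        rw [PySem.List.pyGet?_natCast, hget]
      have e2 : PySem.List.pyGet? ns ((k : Int) + 1) = some b := by
        have : ((k : Int) + 1) = ((k + 1 : Nat) : Int) := by push_cast; ring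
        rw [this, PySem.List.pyGet?_natCast, hgetb]
      rw [e1, e2]
      have erange : ((k : Int) + 1) = ((k + 1 : Nat) : Int) := by push_cast; ring
      rw [chk, erange, ih (k + 1) htail]

theorem nondecreasing_spec' (ns : List Int) : nondecreasing ns = nondecreasing_alt ns := by
  have h := loop_eq_chk ns ns 0 (by simp)
  simp only [Nat.cast_zero] at h
  rw [nondecreasing_eq_chk, nondecreasing_alt, h]

-- ===== VERDICT (by name: the statement is the Claim_ definition above) =====
theorem nondecreasing_spec : Claim_equal_nondecreasing := by
  intro ns _
  unfold Spec_nondecreasing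
  exact nondecreasing_spec' ns
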